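-- pv_equiv track=rewrite | github.com/yangxiaofu/the-owners-sim | demos/contract_valuation_demo.py | get_comparables
-- ===== SOURCE A (Python) =====
-- from typing import Dict, Any, List, Optional
--
-- def get_comparables(contracts: List[Dict], position: str, tier: str = "elite") -> List[Dict]:
--     """Get comparable contracts by position and tier."""
--     # Map generic positions to specific
--     position_map = {
--         "S": ["S", "FS", "SS"],
--         "LB": ["LB", "MLB", "LOLB", "ROLB"],
--         "OG": ["LG", "RG", "G"],
--         "OT": ["LT", "RT", "T"],
--     }
--
--     positions_to_match = position_map.get(position, [position])
--
--     matching = [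
--         c for c in contracts
--         if c["position"] in positions_to_match and c.get("tier") == tier
--     ]
--
--     # If no tier match, get all at position
--     if not matching:
--         matching = [c for c in contracts if c["position"] in positions_to_match]
--
--     return matching[:4]  # Max 4 comparables
-- ===== SOURCE B (Python) =====
-- def get_comparables(contracts, position, tier="elite"):
--     """Get comparable contracts by position and tier.
--
--     Early-terminating scan with bounded buffers: collects at most 4
--     tier matches (stopping as soon as the 4th is found) and at most 4
--     fallback position matches (only while no tier match has appeared),
--     so no full filtered list is ever built and no final slicing is needed.
--     """
--     position_map = {
--         "S": ["S", "FS", "SS"],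
--         "LB": ["LB", "MLB", "LOLB", "ROLB"],
--         "OG": ["LG", "RG", "G"],
--         "OT": ["LT", "RT", "T"],
--     }
--     wanted = position_map.get(position, [position])
--
--     tiered = []
--     fallback = []
--     for c in contracts:
--         if c["position"] not in wanted:
--             continue
--         if c.get("tier") == tier:
--             tiered.append(c)
--             if len(tiered) == 4:
--                 break
--         elif not tiered and len(fallback) < 4:
--             fallback.append(c)
--     return tiered if tiered else fallback
-- ===== Notes on version B (the rewrite author's own statement) =====
-- stated objective: alternative
-- what changed: Replaces A's filter-everything-then-slice-to-4 (two comprehensions with a conditional full re-scan) with an early-terminating scan that keeps at most 4 tier matches and at most 4 fallback position matches, breaking out of the loop as soon as the 4th tier match is found and returning the buffers directly with no slicing.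
import Mathlib
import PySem

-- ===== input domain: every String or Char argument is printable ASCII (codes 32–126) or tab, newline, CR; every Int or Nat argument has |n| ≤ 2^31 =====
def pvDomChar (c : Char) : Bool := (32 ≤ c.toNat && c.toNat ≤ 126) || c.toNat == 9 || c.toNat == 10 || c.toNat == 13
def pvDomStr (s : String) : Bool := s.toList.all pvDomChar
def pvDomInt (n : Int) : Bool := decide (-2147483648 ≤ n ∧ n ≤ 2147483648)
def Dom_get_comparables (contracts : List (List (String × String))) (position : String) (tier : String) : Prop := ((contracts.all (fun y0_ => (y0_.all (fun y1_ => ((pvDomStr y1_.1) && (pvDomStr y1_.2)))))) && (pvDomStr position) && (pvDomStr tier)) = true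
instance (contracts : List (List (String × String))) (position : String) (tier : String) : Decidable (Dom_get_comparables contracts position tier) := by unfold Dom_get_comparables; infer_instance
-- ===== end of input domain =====

-- B replaces A's filter-everything-then-slice with an early-terminating scan keeping
-- bounded (≤ 4) buffers and no slicing; objective: alternative (no speed claim).
-- Contracts are Python dicts as association lists: lookup = first matching key.

-- first-match dict lookup on an association list (shared by both ports; exact for c[k] / c.get(k))
def pvDictGet? (c : List (String × String)) (k : String) : Option String :=
  (c.find? (fun kv => kv.1 == k)).map (·.2)

-- the position_map dict literal and positions_to_match = position_map.get(position, [position])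
def pvPositionsToMatch (position : String) : List String :=
  (PySem.Dict.ofList [("S", ["S", "FS", "SS"]), ("LB", ["LB", "MLB", "LOLB", "ROLB"]),
                      ("OG", ["LG", "RG", "G"]), ("OT", ["LT", "RT", "T"])]).getD position [position]

-- c["position"] in positions_to_match  (the 'none' branch is unreachable under Pre_)
def pvPosOk (ptm : List String) (c : List (String × String)) : Bool :=
  match pvDictGet? c "position" with
  | some p => decide (p ∈ ptm)
  | none => false

-- c.get("tier") == tier
def pvTierOk (tier : String) (c : List (String × String)) : Bool :=
  pvDictGet? c "tier" == some tier

-- ===== PORT A =====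
def get_comparables (contracts : List (List (String × String))) (position : String) (tier : String) : List (List (String × String)) :=
  let positions_to_match := pvPositionsToMatch position
  let matching := contracts.filter (fun c => pvPosOk positions_to_match c && pvTierOk tier c)
  let matching := if matching = [] then contracts.filter (fun c => pvPosOk positions_to_match c) else matching
  PySem.List.slice matching none (some 4)

-- ===== PORT B =====
-- B's for-loop with break/continue, as structural recursion over contracts:
-- 'tiered'/'fallback' are the two bounded buffers, the 4th tier match returns at once.
def pvAltLoop (ptm : List String) (tier : String) :
    List (List (String × String)) → List (List (String × String)) → List (List (String × String)) → List (List (String × String))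
  | [], tiered, fallback => if tiered = [] then fallback else tiered
  | c :: rest, tiered, fallback =>
    if pvPosOk ptm c then
      if pvTierOk tier c then
        if (tiered ++ [c]).length = 4 then tiered ++ [c]
        else pvAltLoop ptm tier rest (tiered ++ [c]) fallback
      else if tiered = [] ∧ fallback.length < 4 then pvAltLoop ptm tier rest tiered (fallback ++ [c])
      else pvAltLoop ptm tier rest tiered fallback
    else pvAltLoop ptm tier rest tiered fallback

def get_comparables_alt (contracts : List (List (String × String))) (position : String) (tier : String) : List (List (String × String)) :=
  let wanted := pvPositionsToMatch position
  pvAltLoop wanted tier contracts [] []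

-- ===== PRECONDITION & SPEC =====
-- Pre_ excludes exactly the contracts lists with an element lacking a "position" key, on which A raises KeyError.
def Pre_get_comparables (contracts : List (List (String × String))) (position : String) (tier : String) : Prop :=
  ∀ c ∈ contracts, "position" ∈ c.map (·.1)
instance (contracts : List (List (String × String))) (position : String) (tier : String) : Decidable (Pre_get_comparables contracts position tier) := by unfold Pre_get_comparables; infer_instance

def pvWitness_get_comparables : (List (List (String × String))) × String × String :=
  ([[("position", "S"), ("tier", "elite")], [("position", "FS")], [("position", "QB"), ("tier", "mid")]], "S", "elite")

def Spec_get_comparables (contracts : List (List (String × String))) (position : String) (tier : String) (out : List (List (String × String))) : Prop := out = get_comparables_alt contracts position tier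
instance (contracts : List (List (String × String))) (position : String) (tier : String) (out : List (List (String × String))) : Decidable (Spec_get_comparables contracts position tier out) := by unfold Spec_get_comparables; infer_instance

-- ===== CLAIM (what is proved, stated in full; the proofs are below) =====
def Claim_equal_get_comparables : Prop := ∀ (contracts : List (List (String × String))) (position : String) (tier : String), Dom_get_comparables contracts position tier → Pre_get_comparables contracts position tier → Spec_get_comparables contracts position tier (get_comparables contracts position tier)

-- ===== LEMMAS AND PROOFS =====

-- invariant of B's loop: with tiered shorter than 4 and fallback capped at 4, the loop
-- computes exactly 'take 4' of A's preferred filter, falling back to 'take 4' of the position filter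
theorem pvAltLoop_eq (ptm : List String) (tier : String) :
    ∀ (l tiered fallback : List (List (String × String))),
      tiered.length < 4 → fallback.length ≤ 4 →
      pvAltLoop ptm tier l tiered fallback =
        (if tiered ++ l.filter (fun c => pvPosOk ptm c && pvTierOk tier c) = []
         then (fallback ++ l.filter (fun c => pvPosOk ptm c)).take 4
         else (tiered ++ l.filter (fun c => pvPosOk ptm c && pvTierOk tier c)).take 4) := by
  intro l
  induction l with
  | nil =>
    intro tiered fallback ht hf
    by_cases h : tiered = []
    · subst h
      simp only [pvAltLoop, List.filter_nil, List.append_nil, if_true]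
      exact (List.take_of_length_le hf).symm
    · simp only [pvAltLoop, List.filter_nil, List.append_nil, if_neg h]
      exact (List.take_of_length_le (by omega)).symm
  | cons c rest ih =>
    intro tiered fallback ht hf
    by_cases hp : pvPosOk ptm c
    · have hfp : List.filter (fun x => pvPosOk ptm x) (c :: rest)
          = c :: List.filter (fun x => pvPosOk ptm x) rest := by simp [hp]
      by_cases htk : pvTierOk tier c
      · have hfb : List.filter (fun x => pvPosOk ptm x && pvTierOk tier x) (c :: rest)
            = c :: List.filter (fun x => pvPosOk ptm x && pvTierOk tier x) rest := by
          simp [hp, htk]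
        by_cases h4 : (tiered ++ [c]).length = 4
        · simp only [pvAltLoop]
          rw [if_pos hp, if_pos htk, if_pos h4, hfb, if_neg (by simp)]
          conv_rhs => rw [List.append_cons]
          rw [List.take_append_of_le_length (le_of_eq h4.symm),
              List.take_of_length_le (le_of_eq h4)]
        · simp only [pvAltLoop]
          rw [if_pos hp, if_pos htk, if_neg h4,
              ih (tiered ++ [c]) fallback (by simp at h4 ⊢; omega) hf, hfb]
          rw [if_neg (by simp), if_neg (by simp)]
          conv_rhs => rw [List.append_cons]
      · have hfb : List.filter (fun x => pvPosOk ptm x && pvTierOk tier x) (c :: rest)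
            = List.filter (fun x => pvPosOk ptm x && pvTierOk tier x) rest := by
          simp [htk]
        by_cases hcond : tiered = [] ∧ fallback.length < 4
        · simp only [pvAltLoop]
          rw [if_pos hp, if_neg htk, if_pos hcond,
              ih tiered (fallback ++ [c]) ht (by simp; omega), hfb, hfp]
          conv_rhs => rw [List.append_cons]
        · simp only [pvAltLoop]
          rw [if_pos hp, if_neg htk, if_neg hcond, ih tiered fallback ht hf, hfb, hfp]
          rcases Decidable.not_and_iff_not_or_not.mp hcond with hne | hlen
          · -- tiered nonempty: the fallback branch is never taken on either side
            rw [if_neg (by simp [hne]), if_neg (by simp [hne])]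
          · -- fallback already holds 4 position matches: take 4 ignores anything appended
            have hf4 : 4 ≤ fallback.length := by omega
            by_cases hemp : tiered ++ List.filter (fun x => pvPosOk ptm x && pvTierOk tier x) rest = []
            · rw [if_pos hemp, if_pos hemp, List.take_append_of_le_length hf4,
                  List.take_append_of_le_length hf4]
            · rw [if_neg hemp, if_neg hemp]
    · have hfp : List.filter (fun x => pvPosOk ptm x) (c :: rest)
          = List.filter (fun x => pvPosOk ptm x) rest := by simp [hp]
      have hfb : List.filter (fun x => pvPosOk ptm x && pvTierOk tier x) (c :: rest)
          = List.filter (fun x => pvPosOk ptm x && pvTierOk tier x) rest := by simp [hp]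
      simp only [pvAltLoop]
      rw [if_neg hp, ih tiered fallback ht hf, hfb, hfp]

-- A's matching[:4] is a plain take 4
theorem pv_slice4 {α : Type} (l : List α) : PySem.List.slice l none (some 4) = l.take 4 :=
  PySem.List.slice_to_natCast l 4

-- ===== VERDICT (by name: the statement is the Claim_ definition above) =====
theorem get_comparables_spec : Claim_equal_get_comparables := by
  intro contracts position tier _ _
  unfold Spec_get_comparables get_comparables get_comparables_alt
  rw [pvAltLoop_eq _ _ contracts [] [] (by simp) (by simp)]
  by_cases h : contracts.filter (fun c => pvPosOk (pvPositionsToMatch position) c && pvTierOk tier c) = [] <;>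
    simp [h, pv_slice4]
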